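-- pv_equiv track=rewrite | github.com/qijiale76/car300 | checker/checker.py | updateLabel
-- ===== SOURCE A (Python) =====
-- def updateLabel(car):
--     status = 0
--     for r in car['records']:
--         if status == 0 and r['label'] == 2:
--             status = 2
--         if r['label'] == 1:
--             status = 1
--     return status
-- ===== SOURCE B (Python) =====
-- def updateLabel(car):
--     labels = [r['label'] for r in car['records']]
--     if 1 in labels:
--         return 1
--     if 2 in labels:
--         return 2
--     return 0
-- ===== Notes on version B (the rewrite author's own statement) =====
-- stated objective: simpler
-- what changed: Replaces the stateful loop carrying a mutable status with building the label list once and deciding by two membership checks (1 wins over 2), eliminating the status accumulator.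
import Mathlib
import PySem

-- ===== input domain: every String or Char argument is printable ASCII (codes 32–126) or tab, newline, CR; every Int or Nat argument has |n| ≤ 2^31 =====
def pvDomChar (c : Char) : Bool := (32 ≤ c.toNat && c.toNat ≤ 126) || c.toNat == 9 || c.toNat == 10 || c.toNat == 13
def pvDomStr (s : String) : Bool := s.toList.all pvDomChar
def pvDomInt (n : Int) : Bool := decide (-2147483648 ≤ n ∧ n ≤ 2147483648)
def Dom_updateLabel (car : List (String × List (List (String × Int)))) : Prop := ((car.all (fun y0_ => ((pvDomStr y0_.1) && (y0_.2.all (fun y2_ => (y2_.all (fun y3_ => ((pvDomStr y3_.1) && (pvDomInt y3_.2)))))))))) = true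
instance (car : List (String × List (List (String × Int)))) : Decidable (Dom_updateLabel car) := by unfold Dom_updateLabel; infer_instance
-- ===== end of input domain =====

-- B builds the label list once and decides by membership checks instead of threading a mutable status; same value everywhere A returns.
-- ===== PORT A =====
def updateLabel (car : List (String × List (List (String × Int)))) : Int :=
  (PySem.Dict.getD ⟨car⟩ "records" []).foldl
    (fun status r =>
      let status := if status = 0 ∧ PySem.Dict.getD ⟨r⟩ "label" 0 = 2 then 2 else status
      if PySem.Dict.getD ⟨r⟩ "label" 0 = 1 then 1 else status)
    0

-- ===== PORT B =====
def updateLabel_alt (car : List (String × List (List (String × Int)))) : Int :=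
  let labels := (PySem.Dict.getD ⟨car⟩ "records" []).map (fun r => PySem.Dict.getD ⟨r⟩ "label" 0)
  if (1 : Int) ∈ labels then 1 else if (2 : Int) ∈ labels then 2 else 0

-- ===== PRECONDITION & SPEC =====
-- Pre_ excludes inputs on which Python A raises KeyError: a missing 'records' key, or a record without a 'label' key.
def Pre_updateLabel (car : List (String × List (List (String × Int)))) : Prop :=
  (PySem.Dict.get? ⟨car⟩ "records").isSome = true ∧
  ∀ r ∈ (PySem.Dict.get? ⟨car⟩ "records").getD [], (PySem.Dict.get? ⟨r⟩ "label").isSome = true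
instance (car : List (String × List (List (String × Int)))) : Decidable (Pre_updateLabel car) := by unfold Pre_updateLabel; infer_instance
def pvWitness_updateLabel : (List (String × List (List (String × Int)))) := [("records", [[("label", 1)], [("label", 2)]])]
def Spec_updateLabel (car : List (String × List (List (String × Int)))) (out : Int) : Prop := out = updateLabel_alt car
instance (car : List (String × List (List (String × Int)))) (out : Int) : Decidable (Spec_updateLabel car out) := by unfold Spec_updateLabel; infer_instance

-- ===== CLAIM (what is proved, stated in full; the proofs are below) =====
def Claim_equal_updateLabel : Prop := ∀ (car : List (String × List (List (String × Int)))), Dom_updateLabel car → Pre_updateLabel car → Spec_updateLabel car (updateLabel car)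

-- ===== LEMMAS AND PROOFS =====

-- ===== VERDICT (by name: the statement is the Claim_ definition above) =====
-- A's fold over records only depends on the labels: characterise it as a function of the label list.
lemma updateLabel_foldl_char (ls : List Int) (s : Int) :
    ls.foldl (fun status l =>
      let status := if status = 0 ∧ l = 2 then 2 else status
      if l = 1 then 1 else status) s
    = if (1 : Int) ∈ ls then 1 else if s ≠ 0 then s else if (2 : Int) ∈ ls then 2 else s := by
  induction ls generalizing s with
  | nil => simp
  | cons l ls ih =>
    simp only [List.foldl_cons, List.mem_cons, ih]
    split_ifs <;> simp_all

lemma updateLabel_as_labels (car : List (String × List (List (String × Int)))) :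
    updateLabel car
    = ((PySem.Dict.getD ⟨car⟩ "records" []).map (fun r => PySem.Dict.getD ⟨r⟩ "label" 0)).foldl
        (fun status l =>
          let status := if status = 0 ∧ l = 2 then 2 else status
          if l = 1 then 1 else status) 0 := by
  simp [updateLabel, List.foldl_map]

theorem updateLabel_spec : Claim_equal_updateLabel := by
  intro car _ _
  unfold Spec_updateLabel updateLabel_alt
  rw [updateLabel_as_labels, updateLabel_foldl_char]
  simp
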